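-- pv_equiv track=rewrite | github.com/CarrieHua/scrapycrawl2 | computeFeature/preprocess/LibreOffice/compute_features.py | compute_reporter_experience
-- ===== SOURCE A (Python) =====
-- def compute_reporter_experience(reporter, time, reporters_dict):
--     reporters_dict[reporter].sort()
--     count = 0
--     for t in reporters_dict[reporter]:
--         if t <= time:
--             count = count + 1
--         else:
--             break
--     return count
-- ===== SOURCE B (Python) =====
-- import bisect
--
-- def compute_reporter_experience(reporter, time, reporters_dict):
--     reporters_dict[reporter].sort()
--     return bisect.bisect_right(reporters_dict[reporter], time)
-- ===== Notes on version B (the rewrite author's own statement) =====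
-- stated objective: faster
-- what changed: B keeps the in-place sort but replaces A's linear scan-and-break counting loop with a binary search (bisect_right) over the sorted list, computing the count of elements <= time by bisection instead of a left-to-right scan.
import Mathlib
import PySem

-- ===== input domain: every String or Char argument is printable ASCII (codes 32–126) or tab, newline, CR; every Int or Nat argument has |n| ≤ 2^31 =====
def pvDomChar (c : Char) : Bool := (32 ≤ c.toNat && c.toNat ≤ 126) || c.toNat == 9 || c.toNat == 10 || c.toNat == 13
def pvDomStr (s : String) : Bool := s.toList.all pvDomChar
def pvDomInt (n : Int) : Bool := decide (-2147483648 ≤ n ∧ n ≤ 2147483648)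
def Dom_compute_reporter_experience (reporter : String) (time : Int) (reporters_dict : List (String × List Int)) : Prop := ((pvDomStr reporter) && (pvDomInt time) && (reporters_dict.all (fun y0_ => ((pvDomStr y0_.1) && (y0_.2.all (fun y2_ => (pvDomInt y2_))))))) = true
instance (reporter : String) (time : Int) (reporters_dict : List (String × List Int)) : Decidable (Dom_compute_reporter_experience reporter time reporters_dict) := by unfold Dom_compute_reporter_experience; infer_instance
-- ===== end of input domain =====

-- B replaces A's linear scan-and-break counting loop (after the in-place sort, which both keep)
-- with a binary search (bisect_right) over the sorted list; equivalence proved on the RETURN value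
-- (both Pythons mutate reporters_dict[reporter] identically by sorting it in place).

-- ===== PORT A =====
-- the for-loop with break: count leading elements ≤ time of the sorted list
def crLoopA (time : Int) : List Int → Int → Int
  | [], count => count
  | t :: ts, count => if t ≤ time then crLoopA time ts (count + 1) else count

def compute_reporter_experience (reporter : String) (time : Int) (reporters_dict : List (String × List Int)) : Int :=
  let s := PySem.List.sorted ((List.lookup reporter reporters_dict).getD []) (fun x => x)
  crLoopA time s 0

-- ===== PORT B =====
def compute_reporter_experience_alt (reporter : String) (time : Int) (reporters_dict : List (String × List Int)) : Int :=
  let s := PySem.List.sorted ((List.lookup reporter reporters_dict).getD []) (fun x => x)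
  Int.ofNat (PySem.List.bisectRight s time)

-- ===== PRECONDITION & SPEC =====
-- Pre_ excludes exactly the inputs where reporter is not a key of reporters_dict:
-- there both Pythons raise KeyError at reporters_dict[reporter].
def Pre_compute_reporter_experience (reporter : String) (time : Int) (reporters_dict : List (String × List Int)) : Prop :=
  (List.lookup reporter reporters_dict).isSome = true
instance (reporter : String) (time : Int) (reporters_dict : List (String × List Int)) : Decidable (Pre_compute_reporter_experience reporter time reporters_dict) := by unfold Pre_compute_reporter_experience; infer_instance

def pvWitness_compute_reporter_experience : String × Int × (List (String × List Int)) := ("a", 5, [("a", [7, 3, 5])])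

def Spec_compute_reporter_experience (reporter : String) (time : Int) (reporters_dict : List (String × List Int)) (out : Int) : Prop := out = compute_reporter_experience_alt reporter time reporters_dict
instance (reporter : String) (time : Int) (reporters_dict : List (String × List Int)) (out : Int) : Decidable (Spec_compute_reporter_experience reporter time reporters_dict out) := by unfold Spec_compute_reporter_experience; infer_instance

-- ===== CLAIM (what is proved, stated in full; the proofs are below) =====
def Claim_equal_compute_reporter_experience : Prop := ∀ (reporter : String) (time : Int) (reporters_dict : List (String × List Int)), Dom_compute_reporter_experience reporter time reporters_dict → Pre_compute_reporter_experience reporter time reporters_dict → Spec_compute_reporter_experience reporter time reporters_dict (compute_reporter_experience reporter time reporters_dict)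

-- ===== LEMMAS AND PROOFS =====

-- On any list whose prefix/suffix structure around index k is monotone w.r.t. time
-- (exactly what bisectRight_spec supplies on a sorted list), the break-loop counts k.
theorem crLoopA_eq (time : Int) (s : List Int) (k : Nat) (c : Int)
    (hk : k ≤ s.length)
    (hle : ∀ (j : Nat) (hj : j < s.length), j < k → s[j] ≤ time)
    (hgt : ∀ (j : Nat) (hj : j < s.length), k ≤ j → time < s[j]) :
    crLoopA time s c = c + (k : Int) := by
  induction s generalizing k c with
  | nil =>
    have : k = 0 := Nat.le_zero.mp hk
    simp [crLoopA, this]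
  | cons t ts ih =>
    by_cases h : t ≤ time
    · -- k ≠ 0: otherwise time < t
      cases k with
      | zero =>
        have := hgt 0 (by simp) (Nat.zero_le _)
        simp at this; omega
      | succ k' =>
        have h1 : k' ≤ ts.length := by simpa using Nat.succ_le_succ_iff.mp (by simpa using hk)
        have h2 : ∀ (j : Nat) (hj : j < ts.length), j < k' → ts[j] ≤ time := by
          intro j hj hjk
          have := hle (j + 1) (by simpa using Nat.succ_lt_succ hj) (Nat.succ_lt_succ hjk)
          simpa using this
        have h3 : ∀ (j : Nat) (hj : j < ts.length), k' ≤ j → time < ts[j] := by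
          intro j hj hjk
          have := hgt (j + 1) (by simpa using Nat.succ_lt_succ hj) (Nat.succ_le_succ hjk)
          simpa using this
        have := ih k' (c + 1) h1 h2 h3
        simp only [crLoopA, if_pos h, this]
        push_cast; omega
    · -- k = 0: otherwise s[0] ≤ time
      have hk0 : k = 0 := by
        by_contra hne
        have := hle 0 (by simp) (Nat.pos_of_ne_zero hne)
        simp at this; omega
      simp [crLoopA, if_neg h, hk0]

-- ===== VERDICT (by name: the statement is the Claim_ definition above) =====
theorem compute_reporter_experience_spec : Claim_equal_compute_reporter_experience := by
  intro reporter time reporters_dict _ _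
  unfold Spec_compute_reporter_experience compute_reporter_experience compute_reporter_experience_alt
  set s := PySem.List.sorted ((List.lookup reporter reporters_dict).getD []) (fun x => x) with hs
  have hpw : s.Pairwise (fun a b => a ≤ b) := by
    simpa using PySem.List.sorted_pairwise ((List.lookup reporter reporters_dict).getD []) (fun x => x)
  obtain ⟨h1, h2, h3⟩ := PySem.List.bisectRight_spec s time hpw
  have := crLoopA_eq time s (PySem.List.bisectRight s time) 0 h1 h2 h3
  simpa using this
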